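-- pv_equiv track=rewrite | github.com/EphraiemSarabamoun/special-character-attack | src/attacks/encoding_attacks.py | binary_encode
-- ===== SOURCE A (Python) =====
-- def binary_encode(text: str, format_style: str = "grouped") -> str:
--     """Encode text as binary"""
--     binary_text = ''.join(format(ord(char), '08b') for char in text)
--
--     if format_style == "grouped":
--         # Group in bytes with spaces
--         return ' '.join(binary_text[i:i+8] for i in range(0, len(binary_text), 8))
--     elif format_style == "continuous":
--         return binary_text
--     elif format_style == "dotted":
--         return '.'.join(binary_text[i:i+4] for i in range(0, len(binary_text), 4))
--
--     return binary_text
-- ===== SOURCE B (Python) =====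
-- def binary_encode(text: str, format_style: str = "grouped") -> str:
--     """Encode text as binary (per-character bytes built once, each branch formats them directly)"""
--     byte_strs = [format(ord(c), '08b') for c in text]
--
--     if format_style == "grouped":
--         return ' '.join(byte_strs)
--     if format_style == "continuous":
--         return ''.join(byte_strs)
--     if format_style == "dotted":
--         return '.'.join(h for b in byte_strs for h in (b[:4], b[4:]))
--
--     return ''.join(byte_strs)
-- ===== Notes on version B (the rewrite author's own statement) =====
-- stated objective: idiomatic
-- what changed: B builds the 8-bit string of each character once and formats every branch directly from that list (join of bytes, join of the two 4-bit halves per byte), instead of concatenating everything into one big string and re-slicing it by index with range().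
import Mathlib
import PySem

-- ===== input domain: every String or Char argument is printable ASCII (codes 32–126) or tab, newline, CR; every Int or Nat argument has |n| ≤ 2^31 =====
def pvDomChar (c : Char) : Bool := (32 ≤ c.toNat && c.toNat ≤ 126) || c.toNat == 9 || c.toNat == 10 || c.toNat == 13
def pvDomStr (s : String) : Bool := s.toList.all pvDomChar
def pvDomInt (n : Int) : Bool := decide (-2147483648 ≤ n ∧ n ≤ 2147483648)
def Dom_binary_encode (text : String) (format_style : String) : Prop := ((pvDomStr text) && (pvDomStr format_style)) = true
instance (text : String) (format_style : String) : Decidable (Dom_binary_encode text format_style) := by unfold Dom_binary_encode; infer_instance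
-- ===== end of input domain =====

-- B builds each character's 8-bit string once and formats every branch from that list,
-- instead of concatenating one big string and re-slicing it by index (objective: idiomatic).

-- ===== PORT A =====
-- format(ord(char), '08b')  =  zero-pad the binary digits of the code point to width 8
def pvFmt8 (c : Char) : List Char :=
  PySem.Chars.zfill (PySem.Int.toBinChars (c.toNat : Int)) 8

def binary_encode (text : String) (format_style : String) : String :=
  let binary_text : List Char := PySem.Chars.join [] (text.toList.map pvFmt8)
  if format_style = "grouped" then
    String.ofList (PySem.Chars.join [' ']
      ((PySem.List.pyRange 0 (binary_text.length : Int) 8).map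
        (fun i => PySem.List.slice binary_text (some i) (some (i + 8)))))
  else if format_style = "continuous" then
    String.ofList binary_text
  else if format_style = "dotted" then
    String.ofList (PySem.Chars.join ['.']
      ((PySem.List.pyRange 0 (binary_text.length : Int) 4).map
        (fun i => PySem.List.slice binary_text (some i) (some (i + 4)))))
  else
    String.ofList binary_text

-- ===== PORT B =====
def binary_encode_alt (text : String) (format_style : String) : String :=
  let byte_strs : List (List Char) := text.toList.map pvFmt8
  if format_style = "grouped" then
    String.ofList (PySem.Chars.join [' '] byte_strs)
  else if format_style = "continuous" then
    String.ofList (PySem.Chars.join [] byte_strs)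
  else if format_style = "dotted" then
    String.ofList (PySem.Chars.join ['.']
      (byte_strs.flatMap (fun b =>
        [PySem.List.slice b none (some 4), PySem.List.slice b (some 4) none])))
  else
    String.ofList (PySem.Chars.join [] byte_strs)

-- ===== PRECONDITION & SPEC =====
def Spec_binary_encode (text : String) (format_style : String) (out : String) : Prop := out = binary_encode_alt text format_style
instance (text : String) (format_style : String) (out : String) : Decidable (Spec_binary_encode text format_style out) := by unfold Spec_binary_encode; infer_instance

-- ===== CLAIM (what is proved, stated in full; the proofs are below) =====
def Claim_equal_binary_encode : Prop := ∀ (text : String) (format_style : String), Dom_binary_encode text format_style → Spec_binary_encode text format_style (binary_encode text format_style)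

-- ===== LEMMAS AND PROOFS =====

lemma join_empty_flatten (ps : List (List Char)) : PySem.Chars.join [] ps = ps.flatten := by
  induction ps with
  | nil => simp [PySem.Chars.join_nil]
  | cons p ps ih =>
    cases ps with
    | nil => simp [PySem.Chars.join_singleton]
    | cons q rest => simp [PySem.Chars.join_cons_cons, ih]

lemma fmt8_len {c : Char} (h : pvDomChar c = true) : (pvFmt8 c).length = 8 := by
  have hlt : c.toNat < 127 := by
    simp only [pvDomChar, Bool.or_eq_true, Bool.and_eq_true, decide_eq_true_eq,
      beq_iff_eq] at h
    omega
  have key : ∀ n : ℕ, n < 127 →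
      (PySem.Chars.zfill (PySem.Int.toBinChars (n : Int)) 8).length = 8 := by decide
  exact key c.toNat hlt

lemma flatten_len_const {k : ℕ} (ps : List (List Char)) (h : ∀ p ∈ ps, p.length = k) :
    ps.flatten.length = k * ps.length := by
  induction ps with
  | nil => simp
  | cons p ps ih =>
    simp only [List.flatten_cons, List.length_append, List.length_cons]
    rw [h p (by simp), ih (fun q hq => h q (by simp [hq]))]
    ring

lemma drop_take_flatten {k : ℕ} (ps : List (List Char)) (h : ∀ p ∈ ps, p.length = k)
    {j : ℕ} (hj : j < ps.length) :
    (ps.flatten.drop (k * j)).take k = ps[j] := by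
  induction ps generalizing j with
  | nil => simp at hj
  | cons p ps ih =>
    cases j with
    | zero =>
      have hp : p.length = k := h p (by simp)
      simp [hp]
    | succ j =>
      have hp : p.length = k := h p (by simp)
      have hmul : k * (j + 1) = p.length + k * j := by rw [hp]; ring
      rw [List.flatten_cons, hmul, List.drop_length_add_append]
      exact ih (fun q hq => h q (by simp [hq])) (by simpa using hj)

lemma chunk_join {k : ℕ} (hk : 0 < k) (ps : List (List Char)) (h : ∀ p ∈ ps, p.length = k) :
    (PySem.List.pyRange 0 (ps.flatten.length : Int) (k : Int)).map
      (fun i => PySem.List.slice ps.flatten (some i) (some (i + (k : Int)))) = ps := by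
  have hlen : ps.flatten.length = k * ps.length := flatten_len_const ps h
  have hk' : (0 : Int) < (k : Int) := by exact_mod_cast hk
  rw [PySem.List.pyRange_of_pos 0 (ps.flatten.length : Int) hk']
  have hcount : (if (0 : Int) < (ps.flatten.length : Int)
      then (((ps.flatten.length : Int) - 0 + k - 1) / k).toNat else 0) = ps.length := by
    rcases Nat.eq_zero_or_pos ps.length with h0 | h0
    · simp [hlen, h0]
    · have hpos : (0 : Int) < (ps.flatten.length : Int) := by
        rw [hlen]; positivity
    
      rw [if_pos hpos]
      have e1 : ((ps.flatten.length : Int) - 0 + k - 1) = ((k * ps.length + k - 1 : ℕ) : Int) := by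
        rw [hlen, Nat.cast_sub (by omega)]; push_cast; ring
      rw [e1, Int.ofNat_ediv_ofNat]
      have e2 : (k * ps.length + k - 1) / k = ps.length := by
        rw [Nat.add_sub_assoc (by omega), Nat.mul_add_div hk]
        have : (k - 1) / k = 0 := Nat.div_eq_of_lt (by omega)
        omega
      simp [e2]
  rw [hcount, List.map_map]
  apply List.ext_getElem (by simp)
  intro j hj hj'
  simp only [List.getElem_map, List.getElem_range, Function.comp]
  have hc : (0 : Int) + (k : Int) * (j : ℕ) = ((k * j : ℕ) : Int) := by push_cast; ring
  rw [hc]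
  have hc2 : ((k * j : ℕ) : Int) + (k : Int) = ((k * j : ℕ) : Int) + ((k : ℕ) : Int) := by norm_cast
  rw [hc2, PySem.List.slice_natCast_add]
  exact drop_take_flatten ps h (by simpa using hj')

lemma chunk_join8 (ps : List (List Char)) (h : ∀ p ∈ ps, p.length = 8) :
    (PySem.List.pyRange 0 (ps.flatten.length : Int) 8).map
      (fun i => PySem.List.slice ps.flatten (some i) (some (i + 8))) = ps := by
  have := chunk_join (k := 8) (by norm_num) ps h
  exact_mod_cast this

lemma chunk_join4 (ps : List (List Char)) (h : ∀ p ∈ ps, p.length = 4) :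
    (PySem.List.pyRange 0 (ps.flatten.length : Int) 4).map
      (fun i => PySem.List.slice ps.flatten (some i) (some (i + 4))) = ps := by
  have := chunk_join (k := 4) (by norm_num) ps h
  exact_mod_cast this

lemma halves_flatten {ps : List (List Char)} (h : ∀ p ∈ ps, p.length = 8) :
    (ps.flatMap (fun b => [b.take 4, b.drop 4])).flatten = ps.flatten := by
  induction ps with
  | nil => simp
  | cons p ps ih =>
    simp only [List.flatMap_cons, List.flatten_append, List.flatten_cons, List.flatten_nil,
      List.append_nil, List.take_append_drop]
    rw [ih (fun q hq => h q (by simp [hq]))]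

lemma halves_len {ps : List (List Char)} (h : ∀ p ∈ ps, p.length = 8) :
    ∀ q ∈ ps.flatMap (fun b => [b.take 4, b.drop 4]), q.length = 4 := by
  intro q hq
  simp only [List.mem_flatMap] at hq
  obtain ⟨b, hb, hq⟩ := hq
  have hb8 := h b hb
  simp only [List.mem_cons] at hq
  rcases hq with rfl | rfl | hq
  · simp [hb8]
  · simp [hb8]
  · simp at hq

lemma slice_halves (b : List Char) :
    [PySem.List.slice b none (some 4), PySem.List.slice b (some 4) none]
      = [b.take 4, b.drop 4] := by
  rw [PySem.List.slice_to b (by norm_num), PySem.List.slice_from b (by norm_num)]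
  rfl

-- ===== VERDICT (by name: the statement is the Claim_ definition above) =====
theorem binary_encode_spec : Claim_equal_binary_encode := by
  intro text format_style hdom
  unfold Spec_binary_encode binary_encode binary_encode_alt
  dsimp only
  have hall : ∀ p ∈ text.toList.map pvFmt8, p.length = 8 := by
    intro p hp
    simp only [List.mem_map] at hp
    obtain ⟨c, hc, rfl⟩ := hp
    apply fmt8_len
    have htext : pvDomStr text = true := by
      simp only [Dom_binary_encode, Bool.and_eq_true] at hdom
      exact hdom.1
    have hall' : ∀ c ∈ text.toList, pvDomChar c = true := by
      simpa [pvDomStr, List.all_eq_true] using htext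
    exact hall' c hc
  split_ifs with h1 h2 h3
  · rw [join_empty_flatten, chunk_join8 _ hall]
  · rfl
  · simp only [slice_halves, join_empty_flatten]
    rw [← halves_flatten hall, chunk_join4 _ (halves_len hall)]
  · rfl
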